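-- pv_equiv track=rewrite | github.com/JoshKarpel/dagger | dagvis.py | compactify_nodes_and_edges
-- ===== SOURCE A (Python) =====
-- import collections
--
-- def nodes_to_layers(nodes, prefixes):
--     layer_to_width = collections.Counter()
--     for node in nodes:
--         prefix = max(p for p in prefixes if node.startswith(p))
--         layer_to_width[prefix] += 1
--
--     if sum(layer_to_width.values()) != len(nodes):
--         missing = "\n".join(
--             n for n in nodes if not any(n.startswith(prefix) for prefix in prefixes)
--         )
--         raise Exception(f"Missing prefixes! Remaining nodes:\n{missing}")
--
--     return layer_to_width
--
-- def compactify_nodes_and_edges(raw_nodes, raw_edges, prefixes):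
--     layers = nodes_to_layers(raw_nodes, prefixes)
--
--     edges = set()
--     for parents, children in raw_edges:
--         parents = tuple(nodes_to_layers(parents, prefixes).keys())
--         children = tuple(nodes_to_layers(children, prefixes).keys())
--         edges.add((parents, children))
--
--     return layers, edges
-- ===== SOURCE B (Python) =====
-- def compactify_nodes_and_edges(raw_nodes, raw_edges, prefixes):
--     # Longest-prefix match via a hash set of prefixes: for each node try its own
--     # prefixes from longest to shortest (matching prefixes of a node are nested,
--     # so the longest one is exactly the lexicographic max A computes).
--     prefix_set = set(prefixes)
--
--     def longest_prefix(node):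
--         for length in range(len(node), -1, -1):
--             candidate = node[:length]
--             if candidate in prefix_set:
--                 return candidate
--         raise Exception(f"Missing prefixes! Remaining nodes:\n{node}")
--
--     def layers_of(nodes):
--         counts = {}
--         for node in nodes:
--             p = longest_prefix(node)
--             counts[p] = counts.get(p, 0) + 1
--         return counts
--
--     layers = layers_of(raw_nodes)
--     edges = {
--         (tuple(layers_of(parents).keys()), tuple(layers_of(children).keys()))
--         for parents, children in raw_edges
--     }
--     return layers, edges
-- ===== Notes on version B (the rewrite author's own statement) =====
-- stated objective: faster
-- what changed: Per node, A scans the whole prefix list taking the lexicographic max of the matching prefixes; B builds a hash set of the prefixes once and probes each node's own prefixes from longest to shortest (matching prefixes of a node are nested, so the longest equals A's lexicographic max), removing the per-node scan over the prefix list.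
import Mathlib
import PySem

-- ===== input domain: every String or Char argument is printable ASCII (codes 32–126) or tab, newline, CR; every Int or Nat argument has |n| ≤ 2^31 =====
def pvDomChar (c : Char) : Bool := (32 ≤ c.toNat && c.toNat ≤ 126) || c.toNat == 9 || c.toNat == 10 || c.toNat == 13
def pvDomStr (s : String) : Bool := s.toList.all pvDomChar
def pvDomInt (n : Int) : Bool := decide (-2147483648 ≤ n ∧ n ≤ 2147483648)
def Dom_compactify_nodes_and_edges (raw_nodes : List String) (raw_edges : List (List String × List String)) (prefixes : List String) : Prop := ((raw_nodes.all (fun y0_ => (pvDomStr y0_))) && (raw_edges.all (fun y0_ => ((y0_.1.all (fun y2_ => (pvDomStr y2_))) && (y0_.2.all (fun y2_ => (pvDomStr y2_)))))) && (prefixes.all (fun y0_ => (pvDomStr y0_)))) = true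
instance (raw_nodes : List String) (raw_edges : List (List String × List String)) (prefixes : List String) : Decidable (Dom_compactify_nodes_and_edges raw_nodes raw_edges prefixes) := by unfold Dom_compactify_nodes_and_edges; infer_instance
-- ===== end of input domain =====

-- B replaces A's per-node scan over all prefixes (lexicographic max of the matching ones)
-- by longest-prefix match against a set of the prefixes, probing the node's own prefixes
-- from longest to shortest; return values proved equal on Pre_ (where Python A raises no exception).

-- ===== PORT A =====
-- max(p for p in prefixes if node.startswith(p)); none = ValueError on an empty generator
def pyMaxMatching (node : String) (prefixes : List String) : Option String :=
  PySem.List.max? (prefixes.filter (fun p => PySem.Str.startswith node p)) (fun p => p)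

-- the counting loop of nodes_to_layers (Counter increment = Dict.modify), threading the raise
def layersLoopA (nodes : List String) (prefixes : List String) : Option (PySem.Dict String Int) :=
  nodes.foldl
    (fun acc node => acc.bind (fun d =>
      (pyMaxMatching node prefixes).map (fun p => d.modify p 0 (· + 1))))
    (some PySem.Dict.empty)

-- nodes_to_layers: the loop, then the `sum(...) != len(nodes)` re-check (its raise = none)
def nodesToLayersA (nodes : List String) (prefixes : List String) : Option (PySem.Dict String Int) :=
  (layersLoopA nodes prefixes).bind (fun d =>
    if d.values.sum ≠ (nodes.length : Int) then none else some d)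

def compactify_nodes_and_edges (raw_nodes : List String) (raw_edges : List (List String × List String)) (prefixes : List String) : (List (String × Int)) × (List (List String × List String)) :=
  match nodesToLayersA raw_nodes prefixes with
  | none => ([], [])   -- Python raises here; excluded by Pre_
  | some layers =>
    match raw_edges.foldl
        (fun acc pc => acc.bind (fun s =>
          (nodesToLayersA pc.1 prefixes).bind (fun pl =>
          (nodesToLayersA pc.2 prefixes).map (fun cl =>
            PySem.Set.add s (pl.keys, cl.keys)))))
        (some (PySem.Set.empty : PySem.Set (List String × List String))) with
    | none => ([], [])   -- Python raises here; excluded by Pre_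
    | some es => (layers.items, es)

-- ===== PORT B =====
-- for length in range(len(node), -1, -1): if node[:length] in prefix_set: return node[:length]
-- (node[:length] with 0 ≤ length ≤ len(node) is exactly `List.take length` on the chars)
def longestAuxB (cs : List Char) (pset : PySem.Set String) : Nat → Option String
  | 0 =>
    if PySem.Set.contains pset (String.ofList (cs.take 0)) then some (String.ofList (cs.take 0))
    else none
  | (L + 1) =>
    if PySem.Set.contains pset (String.ofList (cs.take (L + 1))) then
      some (String.ofList (cs.take (L + 1)))
    else longestAuxB cs pset L

def longestPrefixB (node : String) (pset : PySem.Set String) : Option String :=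
  longestAuxB node.toList pset node.toList.length

-- layers_of: plain dict counting, threading the raise (none) of longest_prefix
def layersOfB (nodes : List String) (pset : PySem.Set String) : Option (PySem.Dict String Int) :=
  nodes.foldl
    (fun acc node => acc.bind (fun d =>
      (longestPrefixB node pset).map (fun p => d.insert p (d.getD p 0 + 1))))
    (some PySem.Dict.empty)

def compactify_nodes_and_edges_alt (raw_nodes : List String) (raw_edges : List (List String × List String)) (prefixes : List String) : (List (String × Int)) × (List (List String × List String)) :=
  let pset := PySem.Set.ofList prefixes
  match layersOfB raw_nodes pset with
  | none => ([], [])   -- Python raises here; excluded by Pre_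
  | some layers =>
    match raw_edges.foldl
        (fun acc pc => acc.bind (fun s =>
          (layersOfB pc.1 pset).bind (fun pl =>
          (layersOfB pc.2 pset).map (fun cl =>
            PySem.Set.add s (pl.keys, cl.keys)))))
        (some (PySem.Set.empty : PySem.Set (List String × List String))) with
    | none => ([], [])
    | some es => (layers.items, es)

-- ===== PRECONDITION & SPEC =====
-- Pre_ excludes exactly the inputs on which Python A raises: some node (in raw_nodes or in an
-- edge's endpoint lists) that no element of `prefixes` is a prefix of (max() of an empty generator).
def Pre_compactify_nodes_and_edges (raw_nodes : List String) (raw_edges : List (List String × List String)) (prefixes : List String) : Prop :=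
  ((raw_nodes.all (fun n => prefixes.any (fun p => PySem.Str.startswith n p))) &&
   (raw_edges.all (fun pc =>
     (pc.1.all (fun n => prefixes.any (fun p => PySem.Str.startswith n p))) &&
     (pc.2.all (fun n => prefixes.any (fun p => PySem.Str.startswith n p)))))) = true
instance (raw_nodes : List String) (raw_edges : List (List String × List String)) (prefixes : List String) : Decidable (Pre_compactify_nodes_and_edges raw_nodes raw_edges prefixes) := by unfold Pre_compactify_nodes_and_edges; infer_instance

def pvWitness_compactify_nodes_and_edges : List String × (List (List String × List String)) × List String :=
  (["a.1", "a.2", "b.1"], [(["a.1", "a.2"], ["b.1"])], ["a.", "b."])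

def Spec_compactify_nodes_and_edges (raw_nodes : List String) (raw_edges : List (List String × List String)) (prefixes : List String) (out : (List (String × Int)) × (List (List String × List String))) : Prop := out = compactify_nodes_and_edges_alt raw_nodes raw_edges prefixes
instance (raw_nodes : List String) (raw_edges : List (List String × List String)) (prefixes : List String) (out : (List (String × Int)) × (List (List String × List String))) : Decidable (Spec_compactify_nodes_and_edges raw_nodes raw_edges prefixes out) := by unfold Spec_compactify_nodes_and_edges; infer_instance

-- ===== CLAIM (what is proved, stated in full; the proofs are below) =====
def Claim_equal_compactify_nodes_and_edges : Prop := ∀ (raw_nodes : List String) (raw_edges : List (List String × List String)) (prefixes : List String), Dom_compactify_nodes_and_edges raw_nodes raw_edges prefixes → Pre_compactify_nodes_and_edges raw_nodes raw_edges prefixes → Spec_compactify_nodes_and_edges raw_nodes raw_edges prefixes (compactify_nodes_and_edges raw_nodes raw_edges prefixes)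

-- ===== LEMMAS AND PROOFS =====

-- a proper prefix is lexicographically strictly smaller (on char lists)
theorem pv_lt_of_proper_prefix {p q : List Char} (h : p <+: q) (hne : p ≠ q) : p < q := by
  obtain ⟨r, rfl⟩ := h
  induction p with
  | nil =>
    cases r with
    | nil => exact absurd rfl hne
    | cons a t => exact List.Lex.nil
  | cons a t ih =>
    exact List.Lex.cons (ih (by intro he; exact hne (by simpa using he)))

theorem pv_laux_none (cs : List Char) (pset : PySem.Set String) (L : Nat)
    (h : ∀ L' ≤ L, PySem.Set.contains pset (String.ofList (cs.take L')) = false) :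
    longestAuxB cs pset L = none := by
  induction L with
  | zero =>
    have h0 := h 0 (Nat.le_refl 0)
    simp only [longestAuxB]
    rw [h0]
    simp
  | succ L ih =>
    have hN := h (L + 1) (Nat.le_refl _)
    simp only [longestAuxB]
    rw [hN]
    simpa using ih (fun L' hL' => h L' (Nat.le_succ_of_le hL'))

theorem pv_laux_found (cs : List Char) (pset : PySem.Set String) (L L0 : Nat)
    (hle : L0 ≤ L)
    (hP : PySem.Set.contains pset (String.ofList (cs.take L0)) = true)
    (hAbove : ∀ L', L0 < L' → L' ≤ L → PySem.Set.contains pset (String.ofList (cs.take L')) = false) :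
    longestAuxB cs pset L = some (String.ofList (cs.take L0)) := by
  induction L with
  | zero =>
    have h0 : L0 = 0 := Nat.le_zero.mp hle
    subst h0
    simp only [longestAuxB]
    rw [hP]
    simp
  | succ L ih =>
    by_cases hEq : L0 = L + 1
    · subst hEq
      simp only [longestAuxB]
      rw [hP]
      simp
    · have hle' : L0 ≤ L := Nat.lt_succ_iff.mp (Nat.lt_of_le_of_ne hle hEq)
      have hNot : PySem.Set.contains pset (String.ofList (cs.take (L + 1))) = false :=
        hAbove (L + 1) (Nat.lt_succ_of_le hle') (Nat.le_refl _)
      simp only [longestAuxB]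
      rw [hNot]
      simpa using ih hle' (fun L' h1 h2 => hAbove L' h1 (Nat.le_succ_of_le h2))

-- membership in the prefix set, as list membership
theorem pv_contains_iff (prefixes : List String) (x : String) :
    PySem.Set.contains (PySem.Set.ofList prefixes) x = true ↔ x ∈ prefixes := by
  simp [pysem]

-- any take of the node's chars that is in `prefixes` passes A's startswith filter
theorem pv_take_startswith (node : String) (L' : Nat) :
    PySem.Str.startswith node (String.ofList (node.toList.take L')) = true := by
  simp only [PySem.Str.startswith_eq, String.toList_ofList]
  exact (PySem.Chars.startswith_iff _ _).mpr (List.take_prefix _ _)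

-- the key lemma: A's lexicographic max of the matching prefixes IS B's longest-prefix match
theorem pv_match_eq (node : String) (prefixes : List String) :
    pyMaxMatching node prefixes = longestPrefixB node (PySem.Set.ofList prefixes) := by
  rcases hM : pyMaxMatching node prefixes with _ | m
  · -- max? = none : no prefix matches, so every probe of B fails too
    rw [pyMaxMatching] at hM
    have hnil := (PySem.List.max?_eq_none_iff _ _).mp hM
    have hnone := List.filter_eq_nil_iff.mp hnil
    refine (pv_laux_none node.toList _ node.toList.length ?_).symm
    intro L' _
    rcases hcb : PySem.Set.contains (PySem.Set.ofList prefixes) (String.ofList (node.toList.take L')) with _ | _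
    · rfl
    · exfalso
      have hmem : String.ofList (node.toList.take L') ∈ prefixes :=
        (pv_contains_iff prefixes _).mp hcb
      exact hnone _ hmem (by rw [pv_take_startswith node L'])
  · -- max? = some m
    have hmem := PySem.List.max?_mem hM
    have hmax := PySem.List.max?_isMax hM
    have hmp : m ∈ prefixes := (List.mem_filter.mp hmem).1
    have hms : m.toList <+: node.toList := by
      have := (List.mem_filter.mp hmem).2
      simp only [PySem.Str.startswith_eq] at this
      exact (PySem.Chars.startswith_iff _ _).mp (by simpa using this)
    have htake : m.toList = node.toList.take m.toList.length := List.prefix_iff_eq_take.mp hms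
    have hlen : m.toList.length ≤ node.toList.length := hms.length_le
    have hP : PySem.Set.contains (PySem.Set.ofList prefixes)
        (String.ofList (node.toList.take m.toList.length)) = true := by
      rw [← htake, String.ofList_toList]
      exact (pv_contains_iff prefixes m).mpr hmp
    have hAbove : ∀ L', m.toList.length < L' → L' ≤ node.toList.length →
        PySem.Set.contains (PySem.Set.ofList prefixes) (String.ofList (node.toList.take L')) = false := by
      intro L' h1 h2
      rcases hcb : PySem.Set.contains (PySem.Set.ofList prefixes) (String.ofList (node.toList.take L')) with _ | _
      · rfl
      · exfalso
        have hmem' : String.ofList (node.toList.take L') ∈ prefixes := (pv_contains_iff prefixes _).mp hcb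
        have hinf : String.ofList (node.toList.take L') ∈
            prefixes.filter (fun p => PySem.Str.startswith node p) :=
          List.mem_filter.mpr ⟨hmem', pv_take_startswith node L'⟩
        have hle : String.ofList (node.toList.take L') ≤ m := hmax _ hinf
        -- but m's char list is a PROPER prefix of take L', so m < take L'
        have hpre : m.toList <+: node.toList.take L' := by
          rw [htake]
          exact List.take_prefix_take_left (Nat.le_of_lt h1)
        have hneq : m.toList ≠ node.toList.take L' := by
          intro he
          have : m.toList.length = L' := by
            rw [he]; exact List.length_take_of_le h2
          omega
        have hlt : m < String.ofList (node.toList.take L') := by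
          rw [String.lt_iff_toList_lt, String.toList_ofList]
          exact pv_lt_of_proper_prefix hpre hneq
        exact absurd hle (not_le.mpr hlt)
    have := pv_laux_found node.toList (PySem.Set.ofList prefixes) node.toList.length
      m.toList.length hlen hP hAbove
    rw [longestPrefixB, this, ← htake, String.ofList_toList]

-- the two counting loops are the same fold (Counter increment = dict get/insert; same key per node)
theorem pv_loop_eq (nodes : List String) (prefixes : List String) :
    layersLoopA nodes prefixes = layersOfB nodes (PySem.Set.ofList prefixes) := by
  unfold layersLoopA layersOfB
  congr 1
  funext acc node
  rw [pv_match_eq]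
  rfl

-- a fold threaded through Option stays none
theorem pv_foldA_none (nodes : List String) (prefixes : List String) :
    nodes.foldl
      (fun acc node => acc.bind (fun d =>
        (pyMaxMatching node prefixes).map (fun p => d.modify p 0 (· + 1))))
      (none : Option (PySem.Dict String Int)) = none := by
  induction nodes with
  | nil => rfl
  | cons n t ih =>
    rw [List.foldl_cons]
    exact ih

-- replacing the unique pair keyed k by (k, v + 1) raises the value sum by exactly 1
theorem pv_sum_map_replace (l : List (String × Int)) (k : String) (v : Int)
    (hnodup : (l.map Prod.fst).Nodup) (hmem : (k, v) ∈ l) :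
    ((l.map (fun p => if p.1 == k then (k, v + 1) else p)).map Prod.snd).sum
      = (l.map Prod.snd).sum + 1 := by
  induction l with
  | nil => simp at hmem
  | cons q t ih =>
    simp only [List.map_cons, List.nodup_cons] at hnodup
    by_cases hqk : q.1 = k
    · have hq : q = (k, v) := by
        rcases List.mem_cons.mp hmem with he | ht
        · exact he.symm
        · exact absurd (hqk ▸ List.mem_map_of_mem ht) hnodup.1
      subst hq
      have hid : t.map (fun p => if p.1 == k then (k, v + 1) else p) = t := by
        conv_rhs => rw [← List.map_id t]
        apply List.map_congr_left
        intro p hp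
        have hpk : p.1 ≠ k := by
          intro he
          have hmm : p.1 ∈ t.map Prod.fst := List.mem_map_of_mem (f := Prod.fst) hp
          rw [he] at hmm
          exact hnodup.1 hmm
        simp [hpk]
      simp only [List.map_cons, List.sum_cons, hid]
      rw [if_pos (by simp)]
      ring
    · have ht : (k, v) ∈ t := by
        rcases List.mem_cons.mp hmem with he | ht
        · exact absurd (by rw [← he]) hqk
        · exact ht
      simp only [List.map_cons, List.sum_cons]
      rw [if_neg (by simp [hqk]), ih hnodup.2 ht]
      ring

-- one Counter increment adds 1 to the sum of the values (keys unique)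
theorem pv_values_sum_modify (d : PySem.Dict String Int) (k : String)
    (hnodup : d.keys.Nodup) :
    ((d.modify k 0 (· + 1)).values).sum = d.values.sum + 1 := by
  show ((d.insert k (d.getD k 0 + 1)).items.map Prod.snd).sum = (d.items.map Prod.snd).sum + 1
  rcases hc : d.contains k with _ | _
  · -- new key: pair appended, its value is 0 + 1
    have hget : d.get? k = none := by
      rw [PySem.Dict.get?_eq_none_iff_contains, hc]
    rw [PySem.Dict.items_insert]
    simp [hc, PySem.Dict.getD_eq_get?_getD, hget]
  · -- existing key: the unique pair (k, v) becomes (k, v + 1)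
    have hkmem : k ∈ d.keys := (PySem.Dict.contains_iff_mem_keys d k).mp hc
    have hex : ∃ v, (k, v) ∈ d.items := by
      rcases List.mem_map.mp (show k ∈ d.items.map Prod.fst from hkmem) with ⟨⟨k', v⟩, hp, he⟩
      exact ⟨v, by simpa [← he] using hp⟩
    rcases hex with ⟨v, hv⟩
    have hget : d.get? k = some v := PySem.Dict.get?_of_mem_items d hv hnodup
    have hgd : d.getD k 0 = v := by rw [PySem.Dict.getD_eq_get?_getD, hget]; rfl
    rw [PySem.Dict.items_insert]
    simp only [hc, if_pos, hgd]
    exact pv_sum_map_replace d.items k v hnodup hv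

-- loop invariant: when the counting loop returns, the counts sum to the number of nodes
theorem pv_loopA_sum (nodes : List String) (prefixes : List String) :
    ∀ (d : PySem.Dict String Int), d.keys.Nodup →
    ∀ d', nodes.foldl
        (fun acc node => acc.bind (fun dd =>
          (pyMaxMatching node prefixes).map (fun p => dd.modify p 0 (· + 1))))
        (some d) = some d' →
    d'.values.sum = d.values.sum + nodes.length := by
  induction nodes with
  | nil =>
    intro d _ d' h
    simp only [List.foldl_nil, Option.some.injEq] at h
    subst h; simp
  | cons n t ih =>
    intro d hnodup d' h
    simp only [List.foldl_cons, Option.bind_some] at h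
    rcases hm : pyMaxMatching n prefixes with _ | p
    · rw [hm] at h
      simp only [Option.map_none] at h
      rw [pv_foldA_none] at h
      exact absurd h (by simp)
    · rw [hm] at h
      simp only [Option.map_some] at h
      have hnodup' : (d.modify p 0 (· + 1)).keys.Nodup :=
        PySem.Dict.nodup_keys_insert d p (d.getD p 0 + 1) hnodup
      have hrec := ih (d.modify p 0 (· + 1)) hnodup' d' h
      rw [hrec, pv_values_sum_modify d p hnodup]
      simp only [List.length_cons]
      push_cast
      ring

-- the dead `sum(...) != len(nodes)` re-check in nodes_to_layers never fires
theorem pv_nodesToLayersA_eq_loop (nodes : List String) (prefixes : List String) :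
    nodesToLayersA nodes prefixes = layersLoopA nodes prefixes := by
  unfold nodesToLayersA
  rcases hL : layersLoopA nodes prefixes with _ | d
  · rfl
  · have hsum : d.values.sum = (nodes.length : Int) := by
      have h0 := pv_loopA_sum nodes prefixes PySem.Dict.empty PySem.Dict.nodup_keys_empty d
        (by simpa [layersLoopA] using hL)
      have he : (PySem.Dict.empty : PySem.Dict String Int).values.sum = 0 := rfl
      rw [he, zero_add] at h0
      exact h0
    simp [hsum]

-- A's nodes_to_layers = B's layers_of, on every input (none = the raise, at the same inputs)
theorem pv_layers_eq (nodes : List String) (prefixes : List String) :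
    nodesToLayersA nodes prefixes = layersOfB nodes (PySem.Set.ofList prefixes) := by
  rw [pv_nodesToLayersA_eq_loop, pv_loop_eq]

theorem pv_main (raw_nodes : List String) (raw_edges : List (List String × List String)) (prefixes : List String) :
    compactify_nodes_and_edges raw_nodes raw_edges prefixes
      = compactify_nodes_and_edges_alt raw_nodes raw_edges prefixes := by
  unfold compactify_nodes_and_edges compactify_nodes_and_edges_alt
  simp only [pv_layers_eq]

-- ===== VERDICT (by name: the statement is the Claim_ definition above) =====
theorem compactify_nodes_and_edges_spec : Claim_equal_compactify_nodes_and_edges := by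
  intro raw_nodes raw_edges prefixes _ _
  exact pv_main raw_nodes raw_edges prefixes
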